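-- pv_equiv track=rewrite | github.com/FahrulID/netrasahaya | catkin_ws/src/netrasahaya/scripts/utils/utils.py | fill_polygon
-- ===== SOURCE A (Python) =====
-- def fill_polygon(polygon_edges):
--     """Fills the interior of the polygon."""
--     filled_points = set()
--     # Group points by rows (y-coordinates)
--     edge_points_by_row = {}
--     for x, y in polygon_edges:
--         edge_points_by_row.setdefault(y, []).append(x)
--
--     # Sort each row's points by x-coordinate
--     for y in edge_points_by_row:
--         edge_points_by_row[y].sort()
--
--     # Fill between edge pairs on each row
--     for y, x_points in edge_points_by_row.items():
--         for i in range(0, len(x_points) - 1, 2):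
--             x_start, x_end = x_points[i], x_points[i + 1]
--             for x in range(x_start, x_end + 1):
--                 filled_points.add((x, y))
--
--     return filled_points
-- ===== SOURCE B (Python) =====
-- def fill_polygon(polygon_edges):
--     """Fills the interior of the polygon (one global sort, then per-row scan)."""
--     by_x = sorted(polygon_edges, key=lambda p: p[0])
--     rows = list(dict.fromkeys(y for _, y in polygon_edges))
--     filled = []
--     for y in rows:
--         xs = [x for x, yy in by_x if yy == y]
--         it = iter(xs)
--         for lo, hi in zip(it, it):
--             filled.extend((x, y) for x in range(lo, hi + 1))
--     return set(filled)
-- ===== Notes on version B (the rewrite author's own statement) =====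
-- stated objective: alternative
-- what changed: Replaces A's hash-grouping-then-per-row-sort with one global sort of all edges by x plus per-row recovery by filtering, pairs edge points with an iterator zip instead of stepped index arithmetic, and accumulates a plain list that is turned into a set once at the end instead of adding to a set inside the innermost loop.
import Mathlib
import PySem

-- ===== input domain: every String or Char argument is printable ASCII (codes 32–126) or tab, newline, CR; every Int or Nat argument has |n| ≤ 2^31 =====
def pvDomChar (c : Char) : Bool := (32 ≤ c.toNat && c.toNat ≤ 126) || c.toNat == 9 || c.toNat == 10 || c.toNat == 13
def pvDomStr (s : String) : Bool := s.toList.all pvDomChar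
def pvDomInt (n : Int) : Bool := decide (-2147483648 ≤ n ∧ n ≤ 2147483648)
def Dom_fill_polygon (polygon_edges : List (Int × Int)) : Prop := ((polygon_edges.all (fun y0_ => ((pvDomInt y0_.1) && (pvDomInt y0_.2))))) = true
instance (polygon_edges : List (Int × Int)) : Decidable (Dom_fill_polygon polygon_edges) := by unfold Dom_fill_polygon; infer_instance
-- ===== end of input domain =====

-- B replaces A's hash-grouping + per-row sort by one global sort by x with per-row
-- recovery, pairs edges with an iterator zip instead of index arithmetic, and builds a
-- plain list converted to a set once at the end (objective: alternative decomposition).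

-- ===== PORT A =====
-- 'edge_points_by_row.setdefault(y, []).append(x)' sets d[y] = d.get(y, []) + [x]: ported exactly as Dict.modify.
-- 'edge_points_by_row[y].sort()' re-inserts the sorted list at key y (y is a present key, so getD's default [] is never read).
-- xs[i], xs[i+1] are ported with pyGetD (i+1 ≤ len-1, so both indices are in range and the default 0 is never read).
def fill_polygon (polygon_edges : List (Int × Int)) : List (Int × Int) :=
  let grouped : PySem.Dict Int (List Int) :=
    polygon_edges.foldl (fun d p => d.modify p.2 [] (fun v => v ++ [p.1])) PySem.Dict.empty
  let byRow : PySem.Dict Int (List Int) :=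
    grouped.keys.foldl (fun d y => d.insert y (PySem.List.sorted (d.getD y []) (fun x => x))) grouped
  byRow.items.foldl (fun s yxs =>
    (PySem.List.pyRange 0 (PySem.List.len yxs.2 - 1) 2).foldl (fun s i =>
      (PySem.List.pyRange (PySem.List.pyGetD yxs.2 i 0) (PySem.List.pyGetD yxs.2 (i + 1) 0 + 1) 1).foldl
        (fun s x => PySem.Set.add s (x, yxs.1)) s) s) PySem.Set.empty

-- ===== PORT B =====
-- pvPairUp ports 'zip(it, it)' on an iterator: consecutive disjoint pairs, odd tail dropped.
def pvPairUp : List Int → List (Int × Int)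
  | a :: b :: rest => (a, b) :: pvPairUp rest
  | _ => []

def fill_polygon_alt (polygon_edges : List (Int × Int)) : List (Int × Int) :=
  let by_x := PySem.List.sorted polygon_edges (fun p => p.1)
  let rows := PySem.List.dedup (polygon_edges.map (fun p => p.2))
  let filled : List (Int × Int) :=
    rows.foldl (fun acc y =>
      (pvPairUp ((by_x.filter (fun p => p.2 == y)).map (fun p => p.1))).foldl
        (fun acc2 lohi => acc2 ++ (PySem.List.pyRange lohi.1 (lohi.2 + 1) 1).map (fun x => (x, y))) acc) []
  PySem.Set.ofList filled

-- ===== PRECONDITION & SPEC =====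
def Spec_fill_polygon (polygon_edges : List (Int × Int)) (out : List (Int × Int)) : Prop := out = fill_polygon_alt polygon_edges
instance (polygon_edges : List (Int × Int)) (out : List (Int × Int)) : Decidable (Spec_fill_polygon polygon_edges out) := by unfold Spec_fill_polygon; infer_instance

-- ===== CLAIM (what is proved, stated in full; the proofs are below) =====
def Claim_equal_fill_polygon : Prop := ∀ (polygon_edges : List (Int × Int)), Dom_fill_polygon polygon_edges → Spec_fill_polygon polygon_edges (fill_polygon polygon_edges)

-- ===== LEMMAS AND PROOFS =====

-- The point sequence one row contributes (shared shape of both ports after rewriting).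
def rowSeq (y : Int) (xs : List Int) : List (Int × Int) :=
  (pvPairUp xs).flatMap (fun lohi => (PySem.List.pyRange lohi.1 (lohi.2 + 1) 1).map (fun x => (x, y)))

-- A's grouping dict, then A's dict after the sorting pass (the two lets of the A port).
def aGroup (e : List (Int × Int)) : PySem.Dict Int (List Int) :=
  e.foldl (fun d p => d.modify p.2 [] (fun v => v ++ [p.1])) PySem.Dict.empty

def aSort (e : List (Int × Int)) : PySem.Dict Int (List Int) :=
  (aGroup e).keys.foldl (fun d y => d.insert y (PySem.List.sorted (d.getD y []) (fun x => x))) (aGroup e)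

-- range(0, len-1, 2) written over Nat
lemma pyRange2 (n : Nat) :
    PySem.List.pyRange 0 ((n : Int) - 1) 2
    = (List.range (n / 2)).map (fun k : Nat => ((2 : Int) * (k : Int))) := by
  have hc : (if (0:Int) < (n:Int) - 1 then (((n:Int) - 1 - 0 + 2 - 1) / 2).toNat else 0) = n / 2 := by
    split_ifs with h <;> omega
  simp only [PySem.List.pyRange]
  rw [if_neg (by norm_num : ¬ (2:Int) = 0), if_pos (by norm_num : (0:Int) < 2), hc]
  apply List.map_congr_left
  intro k _
  ring

-- index pairing = iterator pairing, over Nat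
lemma pairIdxNat : ∀ xs : List Int,
    (List.range (xs.length / 2)).map (fun k => (xs.getD (2 * k) 0, xs.getD (2 * k + 1) 0)) = pvPairUp xs
  | [] => by simp [pvPairUp]
  | [a] => by simp [pvPairUp]
  | a :: b :: rest => by
    have hl : (a :: b :: rest).length / 2 = rest.length / 2 + 1 := by
      simp only [List.length_cons]; omega
    rw [hl, List.range_succ_eq_map, List.map_cons, List.map_map]
    have hf : ∀ k : Nat,
        ((fun k => ((a :: b :: rest).getD (2 * k) 0, (a :: b :: rest).getD (2 * k + 1) 0)) ∘ Nat.succ) k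
        = (rest.getD (2 * k) 0, rest.getD (2 * k + 1) 0) := by
      intro k
      have h1 : 2 * Nat.succ k = 2 * k + 1 + 1 := by omega
      simp [Function.comp, h1]
    rw [List.map_congr_left (fun k _ => hf k), pairIdxNat rest]
    simp [pvPairUp]

lemma pairIdx (xs : List Int) :
    (PySem.List.pyRange 0 (PySem.List.len xs - 1) 2).map
      (fun i => (PySem.List.pyGetD xs i 0, PySem.List.pyGetD xs (i + 1) 0)) = pvPairUp xs := by
  rw [← pairIdxNat xs]
  simp only [PySem.List.len_eq]
  rw [pyRange2 xs.length, List.map_map]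
  apply List.map_congr_left
  intro k _
  show (PySem.List.pyGetD xs ((2 : Int) * (k : Int)) 0, PySem.List.pyGetD xs ((2 : Int) * (k : Int) + 1) 0)
      = (xs.getD (2 * k) 0, xs.getD (2 * k + 1) 0)
  have h1 : ((2 : Int) * (k : Int)) = ((2 * k : Nat) : Int) := by push_cast; ring
  rw [h1]
  have h2 : ((2 * k : Nat) : Int) + 1 = ((2 * k + 1 : Nat) : Int) := by push_cast; ring
  rw [h2, PySem.List.pyGetD_natCast, PySem.List.pyGetD_natCast]

lemma foldl_update {α β : Type} [BEq α] (g : β → List α) :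
    ∀ (l : List β) (s : PySem.Set α),
      l.foldl (fun s x => PySem.Set.update s (g x)) s = PySem.Set.update s (l.flatMap g)
  | [], s => by simp
  | x :: t, s => by
    simp only [List.foldl_cons, List.flatMap_cons, PySem.Set.update_append]
    exact foldl_update g t _

lemma rowFoldA (y : Int) (xs : List Int) (s : PySem.Set (Int × Int)) :
    (PySem.List.pyRange 0 (PySem.List.len xs - 1) 2).foldl (fun s i =>
      (PySem.List.pyRange (PySem.List.pyGetD xs i 0) (PySem.List.pyGetD xs (i + 1) 0 + 1) 1).foldl
        (fun s x => PySem.Set.add s (x, y)) s) s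
    = PySem.Set.update s (rowSeq y xs) := by
  have h1 : ∀ (s : PySem.Set (Int × Int)) (a b : Int),
      (PySem.List.pyRange a b 1).foldl (fun s x => PySem.Set.add s (x, y)) s
      = PySem.Set.update s ((PySem.List.pyRange a b 1).map (fun x => (x, y))) :=
    fun s a b => (PySem.Set.update_map_eq_foldl_add _ _ _).symm
  simp only [h1]
  rw [foldl_update]
  have hseq : (PySem.List.pyRange 0 (PySem.List.len xs - 1) 2).flatMap
      (fun i => (PySem.List.pyRange (PySem.List.pyGetD xs i 0) (PySem.List.pyGetD xs (i + 1) 0 + 1) 1).map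
        (fun x => (x, y)))
      = rowSeq y xs := by
    unfold rowSeq
    rw [← pairIdx xs]
    simp only [List.flatMap_def, List.map_map]
    rfl
  rw [hseq]

lemma keys_aGroup (e : List (Int × Int)) :
    (aGroup e).keys = PySem.List.dedup (e.map (fun p => p.2)) := by
  have h := PySem.Dict.keys_foldl_modify_key (κ := Int) (ν := List Int) (β := Int × Int)
    e (fun p => p.2) [] (fun _ p v => v ++ [p.1]) PySem.Dict.empty
  calc (aGroup e).keys
      = PySem.Set.update PySem.Dict.empty.keys (e.map (fun p => p.2)) := h
    _ = PySem.List.dedup (e.map (fun p => p.2)) := by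
        simp [PySem.Dict.keys_empty, PySem.Set.update_nil_left, PySem.List.dedup_eq_ofList]

lemma nodup_keys_aGroup (e : List (Int × Int)) : (aGroup e).keys.Nodup :=
  PySem.Dict.nodup_keys_foldl_modify_key (κ := Int) (ν := List Int) (β := Int × Int)
    e (fun p => p.2) [] (fun _ p v => v ++ [p.1]) PySem.Dict.empty PySem.Dict.nodup_keys_empty

lemma getD_aGroup (e : List (Int × Int)) (y : Int) :
    (aGroup e).getD y [] = (e.filter (fun p => p.2 == y)).map (fun p => p.1) := by
  have h := PySem.Dict.getD_foldl_modify_append (e.map Prod.swap) PySem.Dict.empty y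
  have h2 : (e.map Prod.swap).foldl (fun d p => d.modify p.1 [] (fun v => v ++ [p.2])) PySem.Dict.empty
      = aGroup e := by
    rw [List.foldl_map]
    rfl
  rw [h2] at h
  rw [h]
  simp [List.filter_map, List.map_map, Function.comp_def]

lemma update_self {α : Type} [BEq α] [LawfulBEq α] (s : PySem.Set α) :
    PySem.Set.update s s = s := by
  rw [PySem.Set.update_eq_append_filter]
  have h : (PySem.Set.ofList s).filter (fun y => !PySem.Set.contains s y) = [] := by
    apply List.filter_eq_nil_iff.mpr
    intro a ha
    have hm : a ∈ s := (PySem.Set.mem_ofList s a).mp ha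
    simpa using hm
  rw [h, List.append_nil]

lemma getD_sortPass : ∀ (ks : List Int) (d : PySem.Dict Int (List Int)), ks.Nodup → ∀ y : Int,
    (ks.foldl (fun d y => d.insert y (PySem.List.sorted (d.getD y []) (fun x => x))) d).getD y []
    = if y ∈ ks then PySem.List.sorted (d.getD y []) (fun x => x) else d.getD y []
  | [], d, _, y => by simp
  | k :: t, d, hnd, y => by
    simp only [List.foldl_cons]
    rw [getD_sortPass t _ (List.nodup_cons.mp hnd).2 y]
    by_cases hyt : y ∈ t
    · have hyk : y ≠ k := fun h => (List.nodup_cons.mp hnd).1 (h ▸ hyt)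
      rw [if_pos hyt, if_pos (List.mem_cons_of_mem k hyt)]
      rw [PySem.Dict.getD_insert]
      simp [hyk]
    · rw [if_neg hyt]
      by_cases hyk : y = k
      · subst hyk
        rw [if_pos (by simp), PySem.Dict.getD_insert]
        simp
      · rw [if_neg (by simp [hyk, hyt]), PySem.Dict.getD_insert]
        simp [hyk]

lemma keys_aSort (e : List (Int × Int)) : (aSort e).keys = (aGroup e).keys := by
  have h := PySem.Dict.keys_foldl_insert (κ := Int) (ν := List Int)
    (aGroup e).keys (fun d y => PySem.List.sorted (d.getD y []) (fun x => x)) (aGroup e)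
  calc (aSort e).keys = PySem.Set.update (aGroup e).keys (aGroup e).keys := h
    _ = (aGroup e).keys := update_self _

lemma items_aSort (e : List (Int × Int)) :
    (aSort e).items = (PySem.List.dedup (e.map (fun p => p.2))).map
      (fun y => (y, PySem.List.sorted ((e.filter (fun p => p.2 == y)).map (fun p => p.1)) (fun x => x))) := by
  have hnod : (aSort e).keys.Nodup := by rw [keys_aSort]; exact nodup_keys_aGroup e
  rw [PySem.Dict.items_eq_map_keys (aSort e) hnod []]
  rw [keys_aSort, keys_aGroup]
  apply List.map_congr_left
  intro y hy
  have hy' : y ∈ (aGroup e).keys := by rw [keys_aGroup]; exact hy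
  have hs := getD_sortPass (aGroup e).keys (aGroup e) (nodup_keys_aGroup e) y
  have : (aSort e).getD y [] = PySem.List.sorted ((aGroup e).getD y []) (fun x => x) := by
    calc (aSort e).getD y []
        = if y ∈ (aGroup e).keys then PySem.List.sorted ((aGroup e).getD y []) (fun x => x)
          else (aGroup e).getD y [] := hs
      _ = _ := if_pos hy'
  rw [this, getD_aGroup]

lemma sorted_filter_row (e : List (Int × Int)) (y : Int) :
    PySem.List.sorted ((e.filter (fun p => p.2 == y)).map (fun p => p.1)) (fun x => x)
    = ((PySem.List.sorted e (fun p => p.1)).filter (fun p => p.2 == y)).map (fun p => p.1) := by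
  apply PySem.List.sorted_id_eq_of_perm_of_pairwise
  · exact (((PySem.List.sorted_perm e (fun p => p.1) false).filter _).map _)
  · have h := PySem.List.sorted_pairwise e (fun p => p.1)
    exact List.pairwise_map.mpr (h.filter _)

lemma fill_polygon_eq_ofList (e : List (Int × Int)) :
    fill_polygon e = PySem.Set.ofList ((aSort e).items.flatMap (fun yxs => rowSeq yxs.1 yxs.2)) := by
  show (aSort e).items.foldl (fun s yxs =>
      (PySem.List.pyRange 0 (PySem.List.len yxs.2 - 1) 2).foldl (fun s i =>
        (PySem.List.pyRange (PySem.List.pyGetD yxs.2 i 0) (PySem.List.pyGetD yxs.2 (i + 1) 0 + 1) 1).foldl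
          (fun s x => PySem.Set.add s (x, yxs.1)) s) s) PySem.Set.empty = _
  simp only [rowFoldA]
  simp only [foldl_update]
  rfl

lemma fill_polygon_alt_eq_ofList (e : List (Int × Int)) :
    fill_polygon_alt e = PySem.Set.ofList ((PySem.List.dedup (e.map (fun p => p.2))).flatMap
      (fun y => rowSeq y (((PySem.List.sorted e (fun p => p.1)).filter (fun p => p.2 == y)).map (fun p => p.1)))) := by
  show PySem.Set.ofList ((PySem.List.dedup (e.map (fun p => p.2))).foldl (fun acc y =>
      (pvPairUp (((PySem.List.sorted e (fun p => p.1)).filter (fun p => p.2 == y)).map (fun p => p.1))).foldl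
        (fun acc2 lohi => acc2 ++ (PySem.List.pyRange lohi.1 (lohi.2 + 1) 1).map (fun x => (x, y))) acc) []) = _
  simp only [PySem.List.foldl_append_eq_flatMap]
  simp [rowSeq]

-- ===== VERDICT (by name: the statement is the Claim_ definition above) =====
theorem fill_polygon_spec : Claim_equal_fill_polygon := by
  intro e _
  unfold Spec_fill_polygon
  rw [fill_polygon_eq_ofList, fill_polygon_alt_eq_ofList]
  congr 1
  rw [items_aSort]
  simp only [List.flatMap_def, List.map_map]
  congr 1
  apply List.map_congr_left
  intro y _
  show rowSeq y (PySem.List.sorted ((e.filter (fun p => p.2 == y)).map (fun p => p.1)) (fun x => x))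
      = rowSeq y (((PySem.List.sorted e (fun p => p.1)).filter (fun p => p.2 == y)).map (fun p => p.1))
  rw [sorted_filter_row]
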